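-- pv_equiv track=rewrite | github.com/aeemo/APS | maximising_xor.py | maximizingXor
-- ===== SOURCE A (Python) =====
-- def maximizingXor(l, r):
--     a = l^r
--
--     b = 0
--     while(a):
--
--         b += 1
--         a >>= 1
--     c, d = 0, 1
--
--     while (b):
--
--         c += d
--         d <<= 1
--         b -= 1
--
--     return c
-- ===== SOURCE B (Python) =====
-- def maximizingXor(l, r):
--     x = l ^ r
--     return (1 << x.bit_length()) - 1
-- ===== Notes on version B (the rewrite author's own statement) =====
-- stated objective: simpler
-- what changed: Replaced A's two while-loops (counting bits of l^r, then re-summing powers of two) with the closed form (1 << (l^r).bit_length()) - 1.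
import Mathlib
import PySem

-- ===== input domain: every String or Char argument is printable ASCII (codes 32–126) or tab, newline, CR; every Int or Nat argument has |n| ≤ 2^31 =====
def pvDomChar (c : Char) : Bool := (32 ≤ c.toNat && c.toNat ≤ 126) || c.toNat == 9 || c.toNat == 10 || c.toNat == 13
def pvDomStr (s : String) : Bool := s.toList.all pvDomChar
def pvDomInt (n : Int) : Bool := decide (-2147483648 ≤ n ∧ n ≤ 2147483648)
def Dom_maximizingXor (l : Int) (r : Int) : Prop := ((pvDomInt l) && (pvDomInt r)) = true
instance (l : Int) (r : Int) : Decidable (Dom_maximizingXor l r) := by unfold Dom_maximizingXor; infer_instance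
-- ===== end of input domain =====

-- B replaces A's two counting loops by the closed form (1 << (l^r).bit_length()) - 1 (objective: simpler).

-- ===== PORT A =====
-- 'b = 0; while(a): b += 1; a >>= 1' — Python diverges when a < 0 (excluded by Pre_);
-- the '0 < a' guard only makes the recursion total, it matches 'while(a)' on all a ≥ 0.
def pvBitCountLoop (a : Int) (b : Int) : Int :=
  if h : 0 < a then pvBitCountLoop (a >>> (1 : Int)) (b + 1) else b
termination_by a.toNat
decreasing_by
  have : a >>> (1 : Int) = a / 2 := by
    rw [show (1:Int) = ((1:Nat):Int) by norm_num, Int.shiftRight_natCast_right,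
        Int.shiftRight_eq_div_pow]; norm_num
  rw [this]; omega

-- 'c, d = 0, 1; while(b): c += d; d <<= 1; b -= 1' — b is always ≥ 0 here, so the
-- '0 < b' guard coincides with Python's 'while(b)' test.
def pvSumLoop (c : Int) (d : Int) (b : Int) : Int :=
  if h : 0 < b then pvSumLoop (c + d) (d <<< (1 : Int)) (b - 1) else c
termination_by b.toNat
decreasing_by omega

def maximizingXor (l : Int) (r : Int) : Int :=
  pvSumLoop 0 1 (pvBitCountLoop (PySem.Int.bxor l r) 0)

-- ===== PORT B =====
-- Python's int.bit_length (of the absolute value), ported by hand; exact for every Nat.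
def pvBitLength (n : Nat) : Nat :=
  if n = 0 then 0 else pvBitLength (n / 2) + 1

def maximizingXor_alt (l : Int) (r : Int) : Int :=
  (1 <<< ((pvBitLength (PySem.Int.bxor l r).natAbs : Nat) : Int)) - 1

-- ===== PRECONDITION & SPEC =====
-- Pre_ excludes PySem.Int.bxor l r < 0 (exactly one of l, r negative): there Python A's first
-- 'while(a)' loop never terminates (a >>= 1 stays -1), so A returns on no such input.
def Pre_maximizingXor (l : Int) (r : Int) : Prop := 0 ≤ PySem.Int.bxor l r
instance (l : Int) (r : Int) : Decidable (Pre_maximizingXor l r) := by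
  unfold Pre_maximizingXor; infer_instance

def pvWitness_maximizingXor : Int × Int := (10, 15)

def Spec_maximizingXor (l : Int) (r : Int) (out : Int) : Prop := out = maximizingXor_alt l r
instance (l : Int) (r : Int) (out : Int) : Decidable (Spec_maximizingXor l r out) := by
  unfold Spec_maximizingXor; infer_instance

-- ===== CLAIM (what is proved, stated in full; the proofs are below) =====
def Claim_equal_maximizingXor : Prop := ∀ (l : Int) (r : Int), Dom_maximizingXor l r →
  Pre_maximizingXor l r → Spec_maximizingXor l r (maximizingXor l r)

-- ===== LEMMAS AND PROOFS =====

theorem pvShiftRight_one (a : Int) : a >>> (1 : Int) = a / 2 := by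
  rw [show (1:Int) = ((1:Nat):Int) by norm_num, Int.shiftRight_natCast_right,
      Int.shiftRight_eq_div_pow]; norm_num

theorem pvBitCountLoop_natCast (n : Nat) : ∀ b : Int,
    pvBitCountLoop (n : Int) b = b + (pvBitLength n : Int) := by
  induction n using Nat.strong_induction_on with
  | _ n ih =>
    intro b
    rcases Nat.eq_zero_or_pos n with h0 | hpos
    · subst h0
      rw [pvBitCountLoop, pvBitLength]
      simp
    · have hlt : n / 2 < n := Nat.div_lt_self hpos (by norm_num)
      rw [pvBitCountLoop]
      have hc : (0 : Int) < (n : Int) := by exact_mod_cast hpos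
      rw [dif_pos hc, pvShiftRight_one,
          show ((n : Int) / 2) = ((n / 2 : Nat) : Int) by exact_mod_cast (Int.natCast_div n 2).symm,
          ih (n / 2) hlt (b + 1)]
      have hr : pvBitLength n = pvBitLength (n / 2) + 1 := by
        rw [pvBitLength, if_neg (Nat.pos_iff_ne_zero.mp hpos)]
      rw [hr]; push_cast; ring

theorem pvSumLoop_natCast (n : Nat) : ∀ c d : Int,
    pvSumLoop c d (n : Int) = c + d * (2 ^ n - 1) := by
  induction n with
  | zero => intro c d; rw [pvSumLoop]; norm_num
  | succ k ih =>
    intro c d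
    rw [pvSumLoop]
    have hc : (0 : Int) < ((k + 1 : Nat) : Int) := by positivity
    rw [dif_pos hc,
        show ((k + 1 : Nat) : Int) - 1 = (k : Int) by push_cast; ring,
        ih]
    have hd : d <<< (1 : Int) = d * 2 := by
      rw [show (1:Int) = ((1:Nat):Int) by norm_num, Int.shiftLeft_eq_mul_pow]; norm_num
    rw [hd]; ring

-- ===== VERDICT (by name: the statement is the Claim_ definition above) =====
theorem maximizingXor_spec : Claim_equal_maximizingXor := by
  intro l r _ hpre
  unfold Spec_maximizingXor maximizingXor maximizingXor_alt
  set x := PySem.Int.bxor l r with hx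
  have hnn : 0 ≤ x := hpre
  have hxn : x = ((x.toNat : Nat) : Int) := (Int.toNat_of_nonneg hnn).symm
  have habs : x.natAbs = x.toNat := by omega
  rw [habs, hxn, pvBitCountLoop_natCast, Int.one_shiftLeft]
  have : (0 : Int) + (pvBitLength x.toNat : Int) = ((pvBitLength x.toNat : Nat) : Int) := by
    ring
  rw [this, pvSumLoop_natCast]
  push_cast
  rw [Int.toNat_natCast]
  ring
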